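-- pv_equiv track=rewrite | github.com/Aymeric-Bled/Generation-De-Ville-Unity | Python/Roads.py | findGroup
-- ===== SOURCE A (Python) =====
-- sets = []
--
-- def findGroup(sets):
--     x = 0
--     y = 0
--     for i in range(len(sets)):
--         set1 = sets[i]
--         for j in range(i):
--             set2 = sets[j]
--             for (x1, y1) in set1:
--                 for (x2, y2) in set2:
--                     if abs(x1 - x2) + abs(y1 - y2) == 1:
--                         x = i
--                         y = j
--                         return (x,y)
--     return None
--
-- i = 0
-- ===== SOURCE B (Python) =====
-- def findGroup(sets):
--     first = {}
--     for i, s in enumerate(sets):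
--         cand = [first[q] for (x, y) in s
--                 for q in ((x + 1, y), (x - 1, y), (x, y + 1), (x, y - 1))
--                 if q in first]
--         if cand:
--             return (i, min(cand))
--         for p in s:
--             if p not in first:
--                 first[p] = i
--     return None
-- ===== Notes on version B (the rewrite author's own statement) =====
-- stated objective: faster
-- what changed: Replaced the quadratic all-pairs-of-sets point comparison with a single pass that hashes each point to the first set index containing it and probes each point's 4 Manhattan neighbours, returning (i, min matching j).
import Mathlib
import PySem

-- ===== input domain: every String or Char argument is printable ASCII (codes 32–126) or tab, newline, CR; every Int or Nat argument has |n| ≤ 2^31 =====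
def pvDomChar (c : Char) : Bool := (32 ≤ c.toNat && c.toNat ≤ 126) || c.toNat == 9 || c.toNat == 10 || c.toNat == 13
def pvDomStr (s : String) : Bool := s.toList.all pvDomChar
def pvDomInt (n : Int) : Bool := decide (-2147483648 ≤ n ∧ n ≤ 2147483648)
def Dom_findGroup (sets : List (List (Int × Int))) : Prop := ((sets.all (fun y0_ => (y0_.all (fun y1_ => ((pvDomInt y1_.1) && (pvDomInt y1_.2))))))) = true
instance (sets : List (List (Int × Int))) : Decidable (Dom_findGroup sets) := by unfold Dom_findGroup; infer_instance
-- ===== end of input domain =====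

-- B replaces A's quadratic scan over all earlier set pairs by one pass that hashes
-- each point to the first set index containing it and probes each point's four
-- Manhattan neighbours (objective: faster, asymptotically fewer point comparisons).

-- ===== PORT A =====
-- inner two loops of A: any point of set1 at Manhattan distance 1 от a point of set2
def findGroup_touch (set1 set2 : List (Int × Int)) : Bool :=
  set1.any (fun p => set2.any (fun q => (p.1 - q.1).natAbs + (p.2 - q.2).natAbs == 1))

def findGroup_loopJ (sets : List (List (Int × Int))) (set1 : List (Int × Int)) (i : Nat) :
    List Nat → Option (Int × Int)
  | [] => none
  | j :: js =>
    if findGroup_touch set1 (sets.getD j []) then some ((i : Int), (j : Int))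
    else findGroup_loopJ sets set1 i js

def findGroup_loopI (sets : List (List (Int × Int))) : List Nat → Option (Int × Int)
  | [] => none
  | i :: is' =>
    match findGroup_loopJ sets (sets.getD i []) i (List.range i) with
    | some r => some r
    | none => findGroup_loopI sets is'

def findGroup (sets : List (List (Int × Int))) : Option (Int × Int) :=
  findGroup_loopI sets (List.range sets.length)

-- ===== PORT B =====
def findGroup_nbrs (p : Int × Int) : List (Int × Int) :=
  [(p.1 + 1, p.2), (p.1 - 1, p.2), (p.1, p.2 + 1), (p.1, p.2 - 1)]

-- the candidate comprehension of B
def findGroup_cands (first : PySem.Dict (Int × Int) Nat) (s : List (Int × Int)) : List Nat :=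
  s.flatMap (fun p => (findGroup_nbrs p).filterMap (fun q => PySem.Dict.get? first q))

-- the 'if p not in first: first[p] = i' loop of B
def findGroup_record (first : PySem.Dict (Int × Int) Nat) (s : List (Int × Int)) (i : Nat) :
    PySem.Dict (Int × Int) Nat :=
  s.foldl (fun d p => if PySem.Dict.contains d p then d else PySem.Dict.insert d p i) first

def findGroup_go (first : PySem.Dict (Int × Int) Nat) (i : Nat) :
    List (List (Int × Int)) → Option (Int × Int)
  | [] => none
  | s :: rest =>
    match findGroup_cands first s with
    | [] => findGroup_go (findGroup_record first s i) (i + 1) rest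
    | c :: cs => some ((i : Int), ((cs.foldl min c : Nat) : Int))

def findGroup_alt (sets : List (List (Int × Int))) : Option (Int × Int) :=
  findGroup_go PySem.Dict.empty 0 sets

-- ===== PRECONDITION & SPEC =====
def Spec_findGroup (sets : List (List (Int × Int))) (out : Option (Int × Int)) : Prop := out = findGroup_alt sets
instance (sets : List (List (Int × Int))) (out : Option (Int × Int)) : Decidable (Spec_findGroup sets out) := by unfold Spec_findGroup; infer_instance

-- ===== CLAIM (what is proved, stated in full; the proofs are below) =====
def Claim_equal_findGroup : Prop := ∀ (sets : List (List (Int × Int))), Dom_findGroup sets → Spec_findGroup sets (findGroup sets)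

-- ===== LEMMAS AND PROOFS =====

-- first index of a set (in a list of sets) containing q
def pvFirstIdx (q : Int × Int) : List (List (Int × Int)) → Option Nat
  | [] => none
  | t :: ts => if q ∈ t then some 0 else (pvFirstIdx q ts).map (· + 1)

-- dict invariant: `first` maps each point to the first processed set containing it
def pvInv (d : PySem.Dict (Int × Int) Nat) (pre : List (List (Int × Int))) : Prop :=
  ∀ q, PySem.Dict.get? d q = pvFirstIdx q pre

theorem pv_loopJ_eq (sets : List (List (Int × Int))) (s : List (Int × Int)) (i : Nat)
    (l : List Nat) :
    findGroup_loopJ sets s i l =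
      (l.find? (fun j => findGroup_touch s (sets.getD j []))).map
        (fun j => ((i : Int), (j : Int))) := by
  induction l with
  | nil => rfl
  | cons j js ih =>
    rw [findGroup_loopJ, List.find?]
    cases h : findGroup_touch s (sets.getD j []) <;> simp [List.getD] at h <;> simp [h, ih]

theorem pv_nbr_iff (p q : Int × Int) :
    (((p.1 - q.1).natAbs + (p.2 - q.2).natAbs == 1) = true) ↔ q ∈ findGroup_nbrs p := by
  obtain ⟨a, b⟩ := p; obtain ⟨c, d⟩ := q
  simp [findGroup_nbrs, Prod.ext_iff]
  omega

theorem pv_mem_cands (d : PySem.Dict (Int × Int) Nat) (s : List (Int × Int)) (j : Nat) :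
    j ∈ findGroup_cands d s ↔
      ∃ p ∈ s, ∃ q ∈ findGroup_nbrs p, PySem.Dict.get? d q = some j := by
  simp [findGroup_cands, List.mem_flatMap, List.mem_filterMap]

theorem pv_firstIdx_some (q : Int × Int) (l : List (List (Int × Int))) (j : Nat) :
    pvFirstIdx q l = some j ↔
      j < l.length ∧ q ∈ l.getD j [] ∧ ∀ k < j, q ∉ l.getD k [] := by
  induction l generalizing j with
  | nil => simp [pvFirstIdx]
  | cons t ts ih =>
    by_cases h : q ∈ t
    · simp only [pvFirstIdx, if_pos h]
      constructor
      · rintro h0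
        cases h0
        simpa using h
      · rintro ⟨_, _, hmin⟩
        cases j with
        | zero => rfl
        | succ j' => exact absurd h (hmin 0 (Nat.succ_pos _))
    · simp only [pvFirstIdx, if_neg h, Option.map_eq_some_iff]
      constructor
      · rintro ⟨j', hj', rfl⟩
        obtain ⟨h1, h2, h3⟩ := (ih j').mp hj'
        refine ⟨by simpa using Nat.succ_lt_succ h1, by simpa using h2, ?_⟩
        intro k hk
        cases k with
        | zero => simpa using h
        | succ k' => simpa using h3 k' (by omega)
      · rintro ⟨h1, h2, h3⟩
        cases j with
        | zero => exact absurd (by simpa using h2) h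
        | succ j' =>
          refine ⟨j', (ih j').mpr ⟨by simpa using h1, by simpa using h2, ?_⟩, rfl⟩
          intro k hk
          have := h3 (k + 1) (by omega)
          simpa using this

theorem pv_firstIdx_none (q : Int × Int) (l : List (List (Int × Int))) :
    pvFirstIdx q l = none ↔ ∀ k < l.length, q ∉ l.getD k [] := by
  induction l with
  | nil => simp [pvFirstIdx]
  | cons t ts ih =>
    by_cases h : q ∈ t
    · simp only [pvFirstIdx, if_pos h]
      constructor
      · intro h0; cases h0
      · intro hall; exact absurd h (by simpa using hall 0 (Nat.succ_pos _))
    · simp only [pvFirstIdx, if_neg h, Option.map_eq_none_iff, ih]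
      constructor
      · intro hall k hk
        cases k with
        | zero => simpa using h
        | succ k' => simpa using hall k' (by simpa using hk)
      · intro hall k hk
        have := hall (k + 1) (by simpa using hk)
        simpa using this

theorem pv_range'_find?_some (P : Nat → Bool) (n a j : Nat) :
    (List.range' a n).find? P = some j ↔
      (a ≤ j ∧ j < a + n ∧ P j = true ∧ ∀ k, a ≤ k → k < j → ¬ P k = true) := by
  induction n generalizing a with
  | zero => simp; omega
  | succ n ih =>
    rw [List.range'_succ, List.find?]
    by_cases h : P a = true
    · simp only [h]
      constructor
      · rintro h0; cases h0
        exact ⟨le_refl _, by omega, h, fun k hk1 hk2 => by omega⟩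
      · rintro ⟨h1, _, _, hmin⟩
        rcases Nat.eq_or_lt_of_le h1 with rfl | hlt
        · rfl
        · exact absurd h (hmin a (le_refl _) hlt)
    · simp only [h, ih]
      constructor
      · rintro ⟨h1, h2, h3, hmin⟩
        refine ⟨by omega, by omega, h3, ?_⟩
        intro k hk1 hk2
        rcases Nat.eq_or_lt_of_le hk1 with rfl | hlt
        · exact h
        · exact hmin k hlt hk2
      · rintro ⟨h1, h2, h3, hmin⟩
        have haj : a ≠ j := by rintro rfl; exact h h3
        exact ⟨by omega, by omega, h3, fun k hk1 hk2 => hmin k (by omega) hk2⟩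

theorem pv_foldl_min_eq (c j0 : Nat) (cs : List Nat) (hmem : j0 ∈ c :: cs)
    (hlb : ∀ k ∈ c :: cs, j0 ≤ k) : cs.foldl min c = j0 := by
  induction cs generalizing c with
  | nil =>
    have h1 := hlb c (by simp)
    have h2 : j0 = c := by simpa using hmem
    simpa using h2.symm
  | cons e cs' ih =>
    simp only [List.foldl]
    apply ih (min c e)
    · rcases (by simpa using hmem : j0 = c ∨ j0 = e ∨ j0 ∈ cs') with rfl | rfl | hm
      · have := hlb e (by simp); simp; omega
      · have := hlb c (by simp); simp; omega
      · simp [hm]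
    · intro k hk
      rcases (by simpa using hk : k = min c e ∨ k ∈ cs') with rfl | hm
      · have h1 := hlb c (by simp); have h2 := hlb e (by simp); omega
      · exact hlb k (by simp [hm])

theorem pv_touch_iff (s t : List (Int × Int)) :
    findGroup_touch s t = true ↔ ∃ p ∈ s, ∃ q ∈ t, q ∈ findGroup_nbrs p := by
  simp only [findGroup_touch, List.any_eq_true]
  constructor
  · rintro ⟨p, hp, q, hq, hadj⟩
    exact ⟨p, hp, q, hq, (pv_nbr_iff p q).mp hadj⟩
  · rintro ⟨p, hp, q, hq, hn⟩
    exact ⟨p, hp, q, hq, (pv_nbr_iff p q).mpr hn⟩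

-- every candidate index touches s and lies in the prefix
theorem pv_cands_sound (d : PySem.Dict (Int × Int) Nat) (pre : List (List (Int × Int)))
    (s : List (Int × Int)) (hinv : pvInv d pre) (k : Nat) (hk : k ∈ findGroup_cands d s) :
    k < pre.length ∧ findGroup_touch s (pre.getD k []) = true := by
  obtain ⟨p, hp, q, hq, hget⟩ := (pv_mem_cands d s k).mp hk
  rw [hinv q] at hget
  obtain ⟨h1, h2, _⟩ := (pv_firstIdx_some q pre k).mp hget
  exact ⟨h1, (pv_touch_iff s _).mpr ⟨p, hp, q, h2, hq⟩⟩

-- the first touching index is a candidate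
theorem pv_cands_complete (d : PySem.Dict (Int × Int) Nat) (pre : List (List (Int × Int)))
    (s : List (Int × Int)) (hinv : pvInv d pre) (j0 : Nat) (hj0 : j0 < pre.length)
    (hF : findGroup_touch s (pre.getD j0 []) = true)
    (hmin : ∀ k < j0, ¬ findGroup_touch s (pre.getD k []) = true) :
    j0 ∈ findGroup_cands d s := by
  obtain ⟨p, hp, q, hq, hn⟩ := (pv_touch_iff s _).mp hF
  -- pvFirstIdx q pre is some k with k = j0
  rcases hfi : pvFirstIdx q pre with _ | k
  · exact absurd hq ((pv_firstIdx_none q pre).mp hfi j0 hj0)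
  · obtain ⟨hk1, hk2, hk3⟩ := (pv_firstIdx_some q pre k).mp hfi
    have hkj : k = j0 := by
      rcases Nat.lt_trichotomy k j0 with h | h | h
      · exact absurd ((pv_touch_iff s _).mpr ⟨p, hp, q, hk2, hn⟩) (hmin k h)
      · exact h
      · exact absurd hq (hk3 j0 h)
    subst hkj
    exact (pv_mem_cands d s k).mpr ⟨p, hp, q, hn, (hinv q).trans hfi⟩

theorem pv_record_get? (s : List (Int × Int)) (d : PySem.Dict (Int × Int) Nat) (i : Nat)
    (q : Int × Int) :
    PySem.Dict.get? (findGroup_record d s i) q =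
      match PySem.Dict.get? d q with
      | some v => some v
      | none => if q ∈ s then some i else none := by
  induction s generalizing d with
  | nil =>
    show PySem.Dict.get? d q = _
    cases PySem.Dict.get? d q <;> simp
  | cons p s' ih =>
    simp only [findGroup_record, List.foldl] at *
    by_cases hc : PySem.Dict.contains d p = true
    · rw [if_pos hc, ih]
      rcases hg : PySem.Dict.get? d q with _ | v
      · have hqp : q ≠ p := by
          rintro rfl
          rw [PySem.Dict.contains_eq_isSome_get?, hg] at hc
          simp at hc
        simp [hqp]
      · simp
    · rw [if_neg hc, ih, PySem.Dict.get?_insert]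
      by_cases hqp : q = p
      · subst hqp
        have hg : PySem.Dict.get? d q = none := by
          rw [PySem.Dict.contains_eq_isSome_get?] at hc
          cases h : PySem.Dict.get? d q
          · rfl
          · rw [h] at hc; simp at hc
        simp [hg]
      · simp [hqp]

theorem pv_firstIdx_append (q : Int × Int) (pre : List (List (Int × Int)))
    (s : List (Int × Int)) :
    pvFirstIdx q (pre ++ [s]) =
      match pvFirstIdx q pre with
      | some v => some v
      | none => if q ∈ s then some pre.length else none := by
  induction pre with
  | nil =>
    simp only [List.nil_append, pvFirstIdx, List.length_nil]
    by_cases h : q ∈ s <;> simp [h]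
  | cons t ts ih =>
    simp only [List.cons_append, pvFirstIdx, ih]
    by_cases h : q ∈ t
    · simp [h]
    · simp only [if_neg h]
      rcases hfi : pvFirstIdx q ts with _ | k
      · by_cases hqs : q ∈ s <;> simp [hqs]
      · simp

theorem pv_inv_record (d : PySem.Dict (Int × Int) Nat) (pre : List (List (Int × Int)))
    (s : List (Int × Int)) (hinv : pvInv d pre) :
    pvInv (findGroup_record d s pre.length) (pre ++ [s]) := by
  intro q
  rw [pv_record_get?, hinv q, pv_firstIdx_append]

theorem pv_getD_append_left (pre rest : List (List (Int × Int))) (j : Nat)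
    (h : j < pre.length) : (pre ++ rest).getD j [] = pre.getD j [] := by
  induction pre generalizing j with
  | nil => simp at h
  | cons t ts ih =>
    cases j with
    | zero => rfl
    | succ j' => simpa using ih j' (by simpa using h)

theorem pv_getD_append_self (pre rest : List (List (Int × Int))) (s : List (Int × Int)) :
    (pre ++ s :: rest).getD pre.length [] = s := by
  induction pre with
  | nil => rfl
  | cons t ts ih => simp [ih]

theorem pv_range_find?_congr (n : Nat) (f g : Nat → Bool) (h : ∀ j < n, f j = g j) :
    (List.range n).find? f = (List.range n).find? g := by
  induction n with
  | zero => rfl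
  | succ n ih =>
    rw [List.range_succ, List.find?_append, List.find?_append,
      ih (fun j hj => h j (by omega))]
    simp [h n (by omega)]

-- the per-step equality: B's min-candidate equals A's first touching j
theorem pv_step (d : PySem.Dict (Int × Int) Nat) (pre : List (List (Int × Int)))
    (s : List (Int × Int)) (hinv : pvInv d pre) :
    (match findGroup_cands d s with
     | [] => (none : Option Nat)
     | c :: cs => some (cs.foldl min c)) =
      (List.range pre.length).find? (fun j => findGroup_touch s (pre.getD j [])) := by
  rcases hf : (List.range pre.length).find? (fun j => findGroup_touch s (pre.getD j []))
    with _ | j0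
  · have hnone := List.find?_eq_none.mp hf
    have : findGroup_cands d s = [] := by
      rcases hc : findGroup_cands d s with _ | ⟨c, cs⟩
      · rfl
      · have hcmem : c ∈ findGroup_cands d s := by rw [hc]; simp
        obtain ⟨h1, h2⟩ := pv_cands_sound d pre s hinv c hcmem
        exact absurd h2 (by simpa using hnone c (List.mem_range.mpr h1))
    simp [this]
  · rw [List.range_eq_range'] at hf
    obtain ⟨_, hj1, hj2, hj3⟩ := (pv_range'_find?_some _ _ _ _).mp hf
    have hmem := pv_cands_complete d pre s hinv j0 (by omega) hj2
      (fun k hk => hj3 k (Nat.zero_le _) hk)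
    have hlb : ∀ k ∈ findGroup_cands d s, j0 ≤ k := by
      intro k hk
      obtain ⟨h1, h2⟩ := pv_cands_sound d pre s hinv k hk
      by_contra h
      exact hj3 k (Nat.zero_le _) (by omega) h2
    rcases hc : findGroup_cands d s with _ | ⟨c, cs⟩
    · rw [hc] at hmem; simp at hmem
    · rw [hc] at hmem hlb
      show some (cs.foldl min c) = some j0
      rw [pv_foldl_min_eq c j0 cs hmem hlb]

theorem pv_go_eq (rest pre : List (List (Int × Int))) (d : PySem.Dict (Int × Int) Nat)
    (hinv : pvInv d pre) :
    findGroup_go d pre.length rest =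
      findGroup_loopI (pre ++ rest) (List.range' pre.length rest.length) := by
  induction rest generalizing pre d with
  | nil => rfl
  | cons s rest' ih =>
    rw [List.length_cons, List.range'_succ, findGroup_loopI, pv_getD_append_self,
      pv_loopJ_eq, findGroup_go]
    rw [pv_range_find?_congr pre.length
      (fun j => findGroup_touch s ((pre ++ s :: rest').getD j []))
      (fun j => findGroup_touch s (pre.getD j []))
      (fun j hj => by
        show findGroup_touch s ((pre ++ s :: rest').getD j []) = findGroup_touch s (pre.getD j [])
        rw [pv_getD_append_left pre (s :: rest') j hj])]
    rw [← pv_step d pre s hinv]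
    rcases hc : findGroup_cands d s with _ | ⟨c, cs⟩
    · have h2 := ih (pre ++ [s]) (findGroup_record d s pre.length)
        (pv_inv_record d pre s hinv)
      simpa using h2
    · rfl

theorem pv_main (sets : List (List (Int × Int))) : findGroup sets = findGroup_alt sets := by
  have hinv : pvInv PySem.Dict.empty [] := by
    intro q; simp [pvFirstIdx, PySem.Dict.get?_empty]
  have h := pv_go_eq sets [] PySem.Dict.empty hinv
  simp only [List.length_nil, List.nil_append] at h
  rw [findGroup_alt, h, findGroup, List.range_eq_range']

-- ===== VERDICT (by name: the statement is the Claim_ definition above) =====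
theorem findGroup_spec : Claim_equal_findGroup := by
  intro sets _
  unfold Spec_findGroup
  exact pv_main sets
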